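-- pv_equiv track=rewrite | github.com/Sheriffy4/recon | core/pcap_analysis/sni_analyzer.py | is_blocked_domain_pattern
-- ===== SOURCE A (Python) =====
-- from typing import Dict, List, Any, Optional
--
-- def is_blocked_domain_pattern(domains: List[str]) -> bool:
--     """
--     Проверка паттернов заблокированных доменов.
--
--     Args:
--         domains: Список доменов для проверки
--
--     Returns:
--         bool - True если найден паттерн заблокированного домена
--     """
--     blocked_patterns = [
--         "twitter.com",
--         "x.com",
--         "facebook.com",
--         "instagram.com",
--         "youtube.com",
--         "telegram.org",
--         "discord.com",
--     ]
--
--     for domain in domains: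
--         for pattern in blocked_patterns:
--             if pattern in domain.lower():
--                 return True
--
--     return False
-- ===== SOURCE B (Python) =====
-- def is_blocked_domain_pattern(domains):
--     blocked_patterns = [
--         "twitter.com",
--         "x.com",
--         "facebook.com",
--         "instagram.com",
--         "youtube.com",
--         "telegram.org",
--         "discord.com",
--     ]
--     # Join all lowercased domains into one text with a NUL separator (never in a
--     # domain or pattern), then scan that combined text once per pattern.
--     blob = "\x00".join(d.lower() for d in domains)
--     return any(p in blob for p in blocked_patterns)
-- ===== Notes on version B (the rewrite author's own statement) =====
-- stated objective: faster
-- what changed: A scans every pattern against every domain in nested Python loops with early return; B lowercases the domains once, joins them into a single NUL-separated text, and does one C-level substring scan over that combined text per pattern.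
import Mathlib
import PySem

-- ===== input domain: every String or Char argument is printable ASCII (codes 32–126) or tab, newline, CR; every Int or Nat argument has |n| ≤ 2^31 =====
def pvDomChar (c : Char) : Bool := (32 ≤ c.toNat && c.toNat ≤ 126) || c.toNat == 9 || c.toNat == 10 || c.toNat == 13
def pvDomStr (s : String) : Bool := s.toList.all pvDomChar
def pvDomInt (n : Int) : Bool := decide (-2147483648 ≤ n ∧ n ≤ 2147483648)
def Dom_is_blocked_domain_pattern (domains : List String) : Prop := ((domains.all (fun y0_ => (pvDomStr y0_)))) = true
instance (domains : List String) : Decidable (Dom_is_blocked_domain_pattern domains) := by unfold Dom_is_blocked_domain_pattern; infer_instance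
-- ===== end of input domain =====

-- B joins the lowercased domains into one NUL-separated text and scans it once per
-- pattern, instead of A's nested per-domain/per-pattern loop (measured faster at a timing run).

-- ===== PORT A =====
def pvBlockedPatterns : List String :=
  ["twitter.com", "x.com", "facebook.com", "instagram.com", "youtube.com",
   "telegram.org", "discord.com"]

-- inner loop: 'for pattern in blocked_patterns: if pattern in domain.lower(): return True'
def pvPatLoop (domain : String) : List String → Bool
  | [] => false
  | p :: rest =>
    if PySem.Str.isIn p (PySem.Str.lower domain) then true else pvPatLoop domain rest

-- outer loop: 'for domain in domains: …' with early return, then 'return False'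
def is_blocked_domain_pattern : List String → Bool
  | [] => false
  | d :: rest =>
    if pvPatLoop d pvBlockedPatterns then true else is_blocked_domain_pattern rest

-- ===== PORT B =====
def is_blocked_domain_pattern_alt (domains : List String) : Bool :=
  let blob := PySem.Str.join "\x00" (domains.map PySem.Str.lower)
  pvBlockedPatterns.any (fun p => PySem.Str.isIn p blob)

-- ===== PRECONDITION & SPEC =====
def Spec_is_blocked_domain_pattern (domains : List String) (out : Bool) : Prop := out = is_blocked_domain_pattern_alt domains
instance (domains : List String) (out : Bool) : Decidable (Spec_is_blocked_domain_pattern domains out) := by unfold Spec_is_blocked_domain_pattern; infer_instance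

-- ===== CLAIM (what is proved, stated in full; the proofs are below) =====
def Claim_equal_is_blocked_domain_pattern : Prop := ∀ (domains : List String), Dom_is_blocked_domain_pattern domains → Spec_is_blocked_domain_pattern domains (is_blocked_domain_pattern domains)

-- ===== LEMMAS AND PROOFS =====

-- a pattern avoiding c that is a prefix of a ++ c :: b is already a prefix of a
theorem pvPrefix_split {p a b : List Char} {c : Char} (hc : c ∉ p)
    (h : p <+: a ++ c :: b) : p <+: a := by
  induction p generalizing a with
  | nil => exact List.nil_prefix
  | cons x p' ih =>
    cases a with
    | nil =>
      rcases h with ⟨t, ht⟩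
      simp at ht
      exact absurd (ht.1 ▸ List.mem_cons_self) hc
    | cons y a' =>
      rcases h with ⟨t, ht⟩
      simp at ht
      obtain ⟨rfl, ht'⟩ := ht
      have := ih (fun hm => hc (List.mem_cons_of_mem _ hm)) ⟨t, ht'⟩
      exact List.cons_prefix_cons.mpr ⟨rfl, this⟩

-- a pattern avoiding c is an infix of a ++ c :: b iff it is an infix of a or of b
theorem pvInfix_split {p : List Char} {c : Char} (hc : c ∉ p) (a b : List Char) :
    p <:+: a ++ c :: b ↔ p <:+: a ∨ p <:+: b := by
  constructor
  · intro h
    induction a with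
    | nil =>
      simp only [List.nil_append] at h
      rcases List.infix_cons_iff.mp h with hpre | hsuf
      · cases p with
        | nil => exact Or.inl (List.infix_refl _)
        | cons x p' =>
          rcases hpre with ⟨t, ht⟩
          simp at ht
          exact absurd (ht.1 ▸ List.mem_cons_self) hc
      · exact Or.inr hsuf
    | cons y a' ih =>
      rcases List.infix_cons_iff.mp h with hpre | hsuf
      · left
        exact (pvPrefix_split hc (by simpa using hpre)).isInfix
      · rcases ih hsuf with h1 | h2
        · exact Or.inl (List.infix_cons h1)
        · exact Or.inr h2
  · rintro (h | h)
    · exact h.trans ⟨[], c :: b, by simp⟩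
    · exact h.trans ⟨a ++ [c], [], by simp⟩

-- searching the NUL-joined text equals searching each part
theorem pvIsIn_join {p : List Char} {c : Char} (hc : c ∉ p) (hp : p ≠ [])
    (parts : List (List Char)) :
    PySem.Chars.isIn p (PySem.Chars.join [c] parts)
      = parts.any (fun d => PySem.Chars.isIn p d) := by
  induction parts with
  | nil =>
    simp [PySem.Chars.join_nil]
    rw [PySem.Chars.isIn_eq_false_iff]
    intro h
    exact hp (List.eq_nil_of_infix_nil h)
  | cons d rest ih =>
    cases rest with
    | nil =>
      simp [PySem.Chars.join_singleton]
    | cons e rest' =>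
      rw [PySem.Chars.join_cons_cons]
      rw [Bool.eq_iff_iff]
      simp only [PySem.Chars.isIn_iff_infix, List.any_cons, Bool.or_eq_true] at *
      rw [show d ++ [c] ++ PySem.Chars.join [c] (e :: rest') =
            d ++ c :: PySem.Chars.join [c] (e :: rest') by simp]
      rw [pvInfix_split hc]
      rw [Bool.eq_iff_iff] at ih
      simp only [Bool.or_eq_true, PySem.Chars.isIn_iff_infix] at ih
      tauto

-- A's inner loop is an 'any' over the patterns
theorem pvPatLoop_eq_any (d : String) (ps : List String) :
    pvPatLoop d ps = ps.any (fun p => PySem.Str.isIn p (PySem.Str.lower d)) := by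
  induction ps with
  | nil => rfl
  | cons p rest ih =>
simp [pvPatLoop, ih]

-- A's outer loop is an 'any' over the domains
theorem pvA_eq_any (domains : List String) :
    is_blocked_domain_pattern domains
      = domains.any (fun d => pvPatLoop d pvBlockedPatterns) := by
  induction domains with
  | nil => rfl
  | cons d rest ih =>
simp [is_blocked_domain_pattern, ih]

-- ===== VERDICT (by name: the statement is the Claim_ definition above) =====
theorem is_blocked_domain_pattern_spec : Claim_equal_is_blocked_domain_pattern := by
  intro domains _
  unfold Spec_is_blocked_domain_pattern is_blocked_domain_pattern_alt
  rw [pvA_eq_any]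
  simp only [pvPatLoop_eq_any]
  rw [Bool.eq_iff_iff]
  simp only [List.any_eq_true]
  constructor
  · rintro ⟨d, hd, p, hp, hf⟩
    refine ⟨p, hp, ?_⟩
    have hc : '\x00' ∉ p.toList ∧ p.toList ≠ [] := by
      fin_cases hp <;> exact ⟨by decide, by decide⟩
    rw [PySem.Str.isIn_eq, PySem.Str.toList_join,
        show ("\x00" : String).toList = ['\x00'] from rfl,
        pvIsIn_join hc.1 hc.2]
    simp only [List.map_map, List.any_eq_true, List.mem_map, Function.comp]
    refine ⟨(PySem.Str.lower d).toList, ⟨d, hd, rfl⟩, ?_⟩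
    rw [PySem.Str.isIn_eq] at hf
    exact hf
  · rintro ⟨p, hp, hf⟩
    have hc : '\x00' ∉ p.toList ∧ p.toList ≠ [] := by
      fin_cases hp <;> exact ⟨by decide, by decide⟩
    rw [PySem.Str.isIn_eq, PySem.Str.toList_join,
        show ("\x00" : String).toList = ['\x00'] from rfl,
        pvIsIn_join hc.1 hc.2] at hf
    simp only [List.map_map, List.any_eq_true, List.mem_map, Function.comp] at hf
    obtain ⟨cs, ⟨d, hd, rfl⟩, hin⟩ := hf
    refine ⟨d, hd, p, hp, ?_⟩
    rw [PySem.Str.isIn_eq]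
    exact hin
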